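-- pv_equiv track=rewrite | github.com/jh27kim/Algorithm | 123.py | solution
-- ===== SOURCE A (Python) =====
-- def solution(n):
--     answer = ''
--     nums = ['1', '2', '4']
--     three = 3
--     while True:
--         n -= three
--         three = three * 3
--         if n <= 0:
--             three = three // 3
--             ind = three + n-1
--             while three > 1:
--                 q, r = divmod(ind, 3)
--                 ind = q
--                 three = three // 3
--                 answer += nums[r]
--             break
--
--     return answer[::-1]
-- ===== SOURCE B (Python) =====
-- def solution(n):
--     nums = ['1', '2', '4']
--     answer = ''
--     while True:
--         n -= 1
--         answer = nums[n % 3] + answer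
--         n //= 3
--         if n <= 0:
--             break
--     return answer
-- ===== Notes on version B (the rewrite author's own statement) =====
-- stated objective: simpler
-- what changed: Replaced A's two-phase scheme (outer loop subtracting 3,9,27,... to locate the digit count, then an inner divmod loop extracting that many base-3 digits plus a final string reversal) by a single do-while bijective base-3 loop that prepends one digit per iteration (n -= 1; digit = nums[n % 3]; n //= 3) with no reversal.
import Mathlib
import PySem

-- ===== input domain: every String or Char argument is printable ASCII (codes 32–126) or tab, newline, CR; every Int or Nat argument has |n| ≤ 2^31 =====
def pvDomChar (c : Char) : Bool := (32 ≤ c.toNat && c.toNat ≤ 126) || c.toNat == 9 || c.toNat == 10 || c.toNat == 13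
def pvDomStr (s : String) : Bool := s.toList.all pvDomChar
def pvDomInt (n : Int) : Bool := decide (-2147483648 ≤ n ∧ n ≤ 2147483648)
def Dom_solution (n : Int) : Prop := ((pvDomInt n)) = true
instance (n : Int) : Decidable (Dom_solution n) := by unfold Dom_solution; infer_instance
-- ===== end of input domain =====

-- B replaces A's count-digits-then-extract scheme by one bijective base-3 do-while loop (simpler; same result).
-- Strings are represented as List Char internally (the PySem convention); the result is assembled with String.ofList.

-- ===== PORT A =====
-- nums = ['1', '2', '4'] (each element is a 1-character string; represented by its character)
def pvNums : List Char := ['1', '2', '4']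

-- the inner `while three > 1` loop: extracts base-3 digits of ind, least significant first
def pvInnerA (ind three : Int) (answer : List Char) : List Char :=
  if _h : 1 < three then
    -- q, r = divmod(ind, 3); ind = q; three = three // 3; answer += nums[r]
    pvInnerA (PySem.Int.floordiv ind 3) (PySem.Int.floordiv three 3)
      (answer ++ [PySem.List.pyGetD pvNums (PySem.Int.mod ind 3) ' '])
  else answer
termination_by three.toNat
decreasing_by
  have h3 : PySem.Int.floordiv three 3 = three / 3 :=
    PySem.Int.floordiv_eq_ediv_of_pos (by norm_num)
  rw [h3]; omega

-- the outer `while True` loop; state (n, three)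
def pvOuterA (n three : Int) : List Char :=
  if h0 : three ≤ 0 then []  -- totality guard only; unreachable from `solution` (three starts at 3 and is only multiplied by 3)
  else
    -- n -= three; three = three * 3
    let n' := n - three
    let three' := three * 3
    if h : n' ≤ 0 then
      -- three = three // 3; ind = three + n - 1; inner loop; break
      let three2 := PySem.Int.floordiv three' 3
      pvInnerA (three2 + n' - 1) three2 []
    else pvOuterA n' three'
termination_by n.toNat
decreasing_by omega

def solution (n : Int) : String :=
  -- return answer[::-1]  (slice with step -1; never raises since the step is nonzero)
  String.ofList ((PySem.List.slice? (pvOuterA n 3) none none (-1)).getD [])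

-- ===== PORT B =====
-- the do-while loop of Source B: n -= 1; answer = nums[n % 3] + answer; n //= 3; break when n <= 0
def pvLoopB (n : Int) : List Char :=
  -- n -= 1; answer = nums[n % 3] + answer; n //= 3; if n <= 0: break (else iterate on the new n)
  if h : PySem.Int.floordiv (n - 1) 3 ≤ 0 then
    [PySem.List.pyGetD pvNums (PySem.Int.mod (n - 1) 3) ' ']
  else
    pvLoopB (PySem.Int.floordiv (n - 1) 3) ++ [PySem.List.pyGetD pvNums (PySem.Int.mod (n - 1) 3) ' ']
termination_by n.toNat
decreasing_by
  simp only [PySem.Int.floordiv_eq_ediv_of_pos (show (0:Int) < 3 by norm_num)] at *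
  omega

def solution_alt (n : Int) : String := String.ofList (pvLoopB n)

-- ===== PRECONDITION & SPEC =====
def Spec_solution (n : Int) (out : String) : Prop := out = solution_alt n
instance (n : Int) (out : String) : Decidable (Spec_solution n out) := by unfold Spec_solution; infer_instance

-- ===== CLAIM (what is proved, stated in full; the proofs are below) =====
def Claim_equal_solution : Prop := ∀ (n : Int), Dom_solution n → Spec_solution n (solution n)

-- ===== LEMMAS AND PROOFS =====

-- the digit character A and B pick for a state value ind
def pvDigit (ind : Int) : Char := PySem.List.pyGetD pvNums (PySem.Int.mod ind 3) ' '

-- k base-3 digits of ind, least significant first (what A's inner loop appends)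
def pvLsb : Int → Nat → List Char
  | _, 0 => []
  | ind, k+1 => pvDigit ind :: pvLsb (PySem.Int.floordiv ind 3) k

-- k base-3 digits of ind, most significant first (what B builds)
def pvMsb : Int → Nat → List Char
  | _, 0 => []
  | ind, k+1 => pvMsb (PySem.Int.floordiv ind 3) k ++ [pvDigit ind]

-- H k = (3^k - 1)/2 = 1 + 3 + ... + 3^(k-1)
def pvH : Nat → Int
  | 0 => 0
  | k+1 => 3 * pvH k + 1

lemma pvH_pow (k : Nat) : (3:Int) ^ k = 2 * pvH k + 1 := by
  induction k with
  | zero => simp [pvH]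
  | succ k ih => rw [pow_succ, ih]; simp [pvH]; ring

lemma pvH_nonneg (k : Nat) : 0 ≤ pvH k := by
  induction k with
  | zero => simp [pvH]
  | succ k ih => simp [pvH]; omega

lemma pvH_mono {j k : Nat} (h : j ≤ k) : pvH j ≤ pvH k := by
  induction k with
  | zero => simp_all
  | succ k ih =>
    rcases Nat.lt_or_ge j (k+1) with hlt | hge
    · have := ih (by omega)
      have := pvH_nonneg k
      simp [pvH]; omega
    · have : j = k + 1 := by omega
      simp [this]

lemma pvH_ge (k : Nat) : (k : Int) ≤ pvH k := by
  induction k with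
  | zero => simp [pvH]
  | succ k ih => simp [pvH]; omega

lemma pvLsb_reverse (k : Nat) : ∀ ind, (pvLsb ind k).reverse = pvMsb ind k := by
  induction k with
  | zero => intro ind; simp [pvLsb, pvMsb]
  | succ k ih => intro ind; simp [pvLsb, pvMsb, ih]

-- A's inner loop on three = 3^k appends exactly the k least-significant-first digits
lemma pvInnerA_spec (k : Nat) : ∀ (ind : Int) (acc : List Char),
    pvInnerA ind ((3:Int) ^ k) acc = acc ++ pvLsb ind k := by
  induction k with
  | zero =>
    intro ind acc
    rw [pvInnerA]
    simp [pvLsb]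
  | succ k ih =>
    intro ind acc
    rw [pvInnerA]
    have h1 : (1:Int) < 3 ^ (k+1) := by
      have := pvH_pow (k+1); have := pvH_nonneg (k+1); simp [pvH] at *; omega
    have h2 : PySem.Int.floordiv ((3:Int) ^ (k+1)) 3 = 3 ^ k := by
      rw [PySem.Int.floordiv_eq_ediv_of_pos (by norm_num)]
      rw [pow_succ]
      omega
    simp only [h1, h2, ih]
    simp [pvLsb, pvDigit]

-- A's outer loop, entered at level j (three = 3^(j+1), n already reduced by 3·H j),
-- breaks after r more iterations and returns the (j+r+1)-digit LSB-first string
lemma pvOuterA_spec (r : Nat) : ∀ (j : Nat) (n : Int),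
    3 * pvH (j + r) < n → n ≤ 3 * pvH (j + r + 1) →
    pvOuterA (n - 3 * pvH j) ((3:Int) ^ (j+1)) = pvLsb (n - pvH (j + r + 1)) (j + r + 1) := by
  induction r with
  | zero =>
    intro j n hlo hhi
    have hp := pvH_pow (j+1)
    have hp' := pvH_pow j
    have hHj := pvH_nonneg j
    have hHd : pvH (j+1) = 3 * pvH j + 1 := rfl
    rw [pvOuterA]
    have h0 : ¬ ((3:Int) ^ (j+1) ≤ 0) := by
      have : (0:Int) < 3 ^ (j+1) := pow_pos (by norm_num) _
      omega
    rw [dif_neg h0]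
    have hbr : n - 3 * pvH j - (3:Int) ^ (j+1) ≤ 0 := by
      simp only [Nat.add_zero] at hhi; omega
    simp only [hbr]
    have h2 : PySem.Int.floordiv ((3:Int) ^ (j+1) * 3) 3 = 3 ^ (j+1) := by
      rw [PySem.Int.floordiv_eq_ediv_of_pos (by norm_num)]
      omega
    rw [h2]
    have hind : (3:Int) ^ (j+1) + (n - 3 * pvH j - 3 ^ (j+1)) - 1 = n - pvH (j+1) := by omega
    rw [hind, pvInnerA_spec]
    simp
  | succ r ih =>
    intro j n hlo hhi
    have eidx : j + (r+1) = j + 1 + r := by omega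
    rw [eidx] at hlo hhi ⊢
    have hp := pvH_pow (j+1)
    have hp' := pvH_pow j
    have hHj := pvH_nonneg j
    have hHd : pvH (j+1) = 3 * pvH j + 1 := rfl
    have hmono : pvH (j+1) ≤ pvH (j + 1 + r) := pvH_mono (by omega)
    rw [pvOuterA]
    have h0 : ¬ ((3:Int) ^ (j+1) ≤ 0) := by
      have : (0:Int) < 3 ^ (j+1) := pow_pos (by norm_num) _
      omega
    rw [dif_neg h0]
    have hbr : ¬ (n - 3 * pvH j - (3:Int) ^ (j+1) ≤ 0) := by omega
    simp only [hbr]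
    have harg : n - 3 * pvH j - (3:Int) ^ (j+1) = n - 3 * pvH (j+1) := by omega
    have hpow : (3:Int) ^ (j+1) * 3 = 3 ^ ((j+1)+1) := (pow_succ 3 (j+1)).symm
    rw [harg, hpow, ih (j+1) n (by omega : 3 * pvH ((j+1) + r) < n) hhi]
    simp

-- B's loop on any n in the (k+1)-digit band returns the MSB-first digits of n - H(k+1)
lemma pvLoopB_spec (k : Nat) : ∀ (n : Int),
    3 * pvH k < n → n ≤ 3 * pvH (k+1) →
    pvLoopB n = pvMsb (n - pvH (k+1)) (k+1) := by
  induction k with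
  | zero =>
    intro n hlo hhi
    simp [pvH] at hlo hhi
    rw [pvLoopB]
    have hd : PySem.Int.floordiv (n - 1) 3 = (n - 1) / 3 :=
      PySem.Int.floordiv_eq_ediv_of_pos (by norm_num)
    have h2 : PySem.Int.floordiv (n - 1) 3 ≤ 0 := by rw [hd]; omega
    rw [dif_pos h2]
    have h1 : pvH 1 = 1 := rfl
    simp [pvMsb, pvDigit, h1]
  | succ k ih =>
    intro n hlo hhi
    have hHk := pvH_nonneg k
    have hd1 : pvH (k+1) = 3 * pvH k + 1 := rfl
    have hd2 : pvH (k+1+1) = 3 * pvH (k+1) + 1 := rfl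
    rw [pvLoopB]
    have hd : PySem.Int.floordiv (n - 1) 3 = (n - 1) / 3 :=
      PySem.Int.floordiv_eq_ediv_of_pos (by norm_num)
    have hn2lo : 3 * pvH k < PySem.Int.floordiv (n - 1) 3 := by rw [hd]; omega
    have hn2hi : PySem.Int.floordiv (n - 1) 3 ≤ 3 * pvH (k+1) := by rw [hd]; omega
    have hpos : ¬ (PySem.Int.floordiv (n - 1) 3 ≤ 0) := by
      have := pvH_nonneg k; omega
    rw [dif_neg hpos]
    rw [ih _ hn2lo hn2hi]
    have e1 : PySem.Int.floordiv (n-1) 3 - pvH (k+1) = PySem.Int.floordiv (n - pvH (k+1+1)) 3 := by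
      rw [hd, PySem.Int.floordiv_eq_ediv_of_pos (by norm_num : (0:Int) < 3)]
      omega
    have e2 : PySem.List.pyGetD pvNums (PySem.Int.mod (n-1) 3) ' ' = pvDigit (n - pvH (k+1+1)) := by
      simp only [pvDigit]
      congr 1
      rw [PySem.Int.mod_eq_emod_of_pos (by norm_num : (0:Int) < 3),
          PySem.Int.mod_eq_emod_of_pos (by norm_num : (0:Int) < 3)]
      omega
    rw [e1, e2]
    rfl

-- the one-digit case (covers every n ≤ 3, including n ≤ 0)
lemma pvOuterA_small (n : Int) (h : n ≤ 3) : pvOuterA n 3 = [pvDigit (n - 1)] := by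
  rw [pvOuterA]
  rw [dif_neg (by norm_num : ¬ (3:Int) ≤ 0)]
  have hbr : n - 3 ≤ 0 := by omega
  simp only [hbr]
  have h2 : PySem.Int.floordiv ((3:Int) * 3) 3 = 3 := by
    rw [PySem.Int.floordiv_eq_ediv_of_pos (by norm_num)]; norm_num
  rw [h2]
  have hind : (3:Int) + (n - 3) - 1 = n - 1 := by omega
  rw [hind]
  have : (3:Int) = 3 ^ 1 := by norm_num
  rw [this, pvInnerA_spec]
  simp [pvLsb]

lemma pvLoopB_small (n : Int) (h : n ≤ 3) : pvLoopB n = [pvDigit (n - 1)] := by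
  rw [pvLoopB]
  have hd : PySem.Int.floordiv (n - 1) 3 = (n - 1) / 3 :=
    PySem.Int.floordiv_eq_ediv_of_pos (by norm_num)
  have h2 : PySem.Int.floordiv (n - 1) 3 ≤ 0 := by rw [hd]; omega
  rw [dif_pos h2]
  rfl

-- every n > 3 lies in exactly one digit band
lemma pv_band (n : Int) (h : 3 < n) : ∃ k : Nat, 3 * pvH k < n ∧ n ≤ 3 * pvH (k+1) := by
  have hex : ∃ m : Nat, n ≤ 3 * pvH (m+1) := by
    refine ⟨n.toNat, ?_⟩
    have := pvH_ge (n.toNat + 1)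
    omega
  classical
  have hk : n ≤ 3 * pvH (Nat.find hex + 1) := Nat.find_spec hex
  have hkpos : 0 < Nat.find hex := by
    by_contra h0
    have hz : Nat.find hex = 0 := by omega
    rw [hz] at hk
    have h1 : pvH (0 + 1) = 1 := rfl
    omega
  have hprev : ¬ (n ≤ 3 * pvH (Nat.find hex - 1 + 1)) := Nat.find_min hex (by omega)
  refine ⟨Nat.find hex, ?_, hk⟩
  have he : Nat.find hex - 1 + 1 = Nat.find hex := by omega
  rw [he] at hprev
  omega

-- ===== VERDICT (by name: the statement is the Claim_ definition above) =====
theorem solution_spec : Claim_equal_solution := by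
  unfold Claim_equal_solution
  intro n _
  unfold Spec_solution solution solution_alt
  rw [PySem.List.slice?_none_none_neg_one]
  simp only [Option.getD_some]
  congr 1
  rcases le_or_gt n 3 with h | h
  · rw [pvOuterA_small n h, pvLoopB_small n h]
    rfl
  · obtain ⟨k, hlo, hhi⟩ := pv_band n h
    have hA := pvOuterA_spec k 0 n (by simpa using hlo) (by simpa using hhi)
    have hz : pvH 0 = 0 := rfl
    simp only [Nat.zero_add, hz, mul_zero, sub_zero, pow_one] at hA
    rw [hA, pvLsb_reverse, pvLoopB_spec k n hlo hhi]
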